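-- pv_equiv track=rewrite | github.com/TheRealLuro/enigma | enigma_server/apis/database/staking_rules.py | _research_depth_for_elapsed
-- ===== SOURCE A (Python) =====
-- RESEARCH_DEPTH_LEVELS: list[tuple[int, str]] = [
--     (48 * 3600, "Surface Scan"),
--     (72 * 3600, "Structural Mapping"),
--     (7 * 24 * 3600, "Puzzle Pattern Analysis"),
--     (14 * 24 * 3600, "Dimensional Core Study"),
-- ]
--
-- def _research_depth_for_elapsed(elapsed_seconds: int) -> tuple[int, str]:
--     depth_level = 0
--     depth_label = "Containment Pending"
--     for index, (threshold, label) in enumerate(RESEARCH_DEPTH_LEVELS, start=1):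
--         if elapsed_seconds >= threshold:
--             depth_level = index
--             depth_label = label
--     return depth_level, depth_label
-- ===== SOURCE B (Python) =====
-- RESEARCH_DEPTH_LEVELS: list[tuple[int, str]] = [
--     (48 * 3600, "Surface Scan"),
--     (72 * 3600, "Structural Mapping"),
--     (7 * 24 * 3600, "Puzzle Pattern Analysis"),
--     (14 * 24 * 3600, "Dimensional Core Study"),
-- ]
--
-- def _research_depth_for_elapsed(elapsed_seconds: int) -> tuple[int, str]:
--     # Binary search (bisect_right by hand) over the sorted thresholds.
--     thresholds = [t for t, _ in RESEARCH_DEPTH_LEVELS]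
--     lo, hi = 0, len(thresholds)
--     while lo < hi:
--         mid = (lo + hi) // 2
--         if elapsed_seconds < thresholds[mid]:
--             hi = mid
--         else:
--             lo = mid + 1
--     if lo == 0:
--         return (0, "Containment Pending")
--     return (lo, RESEARCH_DEPTH_LEVELS[lo - 1][1])
-- ===== Notes on version B (the rewrite author's own statement) =====
-- stated objective: alternative
-- what changed: Replaces the linear last-match scan over all levels with a hand-rolled bisect_right binary search on the sorted threshold list, indexing the matching label directly.
import Mathlib
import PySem

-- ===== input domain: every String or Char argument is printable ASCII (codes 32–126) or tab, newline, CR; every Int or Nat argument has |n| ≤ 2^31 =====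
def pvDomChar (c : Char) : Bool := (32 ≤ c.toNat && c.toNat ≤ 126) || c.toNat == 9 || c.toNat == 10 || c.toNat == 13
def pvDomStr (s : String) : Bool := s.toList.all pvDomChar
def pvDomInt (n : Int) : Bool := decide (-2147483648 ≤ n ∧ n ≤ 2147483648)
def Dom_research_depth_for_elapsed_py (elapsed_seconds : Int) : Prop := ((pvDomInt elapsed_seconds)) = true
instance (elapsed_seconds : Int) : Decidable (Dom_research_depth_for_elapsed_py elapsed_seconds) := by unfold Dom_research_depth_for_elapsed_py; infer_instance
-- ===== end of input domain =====

-- B replaces A's linear last-match scan with a hand-rolled bisect_right binary search over the sorted thresholds (alternative structure, same result).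

-- ===== PORT A =====
-- RESEARCH_DEPTH_LEVELS (module constant)
def pvLevels : List (Int × String) :=
  [(48 * 3600, "Surface Scan"),
   (72 * 3600, "Structural Mapping"),
   (7 * 24 * 3600, "Puzzle Pattern Analysis"),
   (14 * 24 * 3600, "Dimensional Core Study")]

-- literal port of A: fold over enumerate(RESEARCH_DEPTH_LEVELS, start=1), keeping the last level met
def research_depth_for_elapsed_py (elapsed_seconds : Int) : Int × String :=
  (PySem.List.enumerate pvLevels 1).foldl
    (fun (st : Int × String) p =>
      if elapsed_seconds ≥ p.2.1 then (p.1, p.2.2) else st)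
    (0, "Containment Pending")

-- ===== PORT B =====
-- hand-rolled bisect_right loop of Source B, transcribed as lo/hi recursion
def pvBisect (xs : List Int) (x : Int) (lo hi : Nat) : Nat :=
  if lo < hi then
    let mid := (lo + hi) / 2
    if x < xs.getD mid 0 then pvBisect xs x lo mid
    else pvBisect xs x (mid + 1) hi
  else lo
termination_by hi - lo
decreasing_by all_goals omega

def research_depth_for_elapsed_py_alt (elapsed_seconds : Int) : Int × String :=
  let thresholds := pvLevels.map (·.1)
  let lo := pvBisect thresholds elapsed_seconds 0 thresholds.length
  if lo = 0 then (0, "Containment Pending")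
  else ((lo : Int), ((pvLevels.getD (lo - 1) (0, "")).2))

-- ===== PRECONDITION & SPEC =====
def Spec_research_depth_for_elapsed_py (elapsed_seconds : Int) (out : Int × String) : Prop := out = research_depth_for_elapsed_py_alt elapsed_seconds
instance (elapsed_seconds : Int) (out : Int × String) : Decidable (Spec_research_depth_for_elapsed_py elapsed_seconds out) := by unfold Spec_research_depth_for_elapsed_py; infer_instance

-- ===== CLAIM (what is proved, stated in full; the proofs are below) =====
def Claim_equal_research_depth_for_elapsed_py : Prop := ∀ (elapsed_seconds : Int), Dom_research_depth_for_elapsed_py elapsed_seconds → Spec_research_depth_for_elapsed_py elapsed_seconds (research_depth_for_elapsed_py elapsed_seconds)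

-- ===== LEMMAS AND PROOFS =====

lemma pvBisect_eval (xs : List Int) (x : Int) (lo hi : Nat) :
    pvBisect xs x lo hi = if lo < hi then
      (if x < xs.getD ((lo + hi) / 2) 0 then pvBisect xs x lo ((lo + hi) / 2)
       else pvBisect xs x ((lo + hi) / 2 + 1) hi) else lo := by
  rw [pvBisect]

lemma pvBis0 (e : Int) (h : e < 172800) :
    pvBisect [172800, 259200, 604800, 1209600] e 0 4 = 0 := by
  have c1 : e < 604800 := by omega
  have c2 : e < 259200 := by omega
  rw [pvBisect_eval]; norm_num [c1]
  rw [pvBisect_eval]; norm_num [c2]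
  rw [pvBisect_eval]; norm_num [h]
  rw [pvBisect_eval]; norm_num

lemma pvBis1 (e : Int) (h1 : 172800 ≤ e) (h2 : e < 259200) :
    pvBisect [172800, 259200, 604800, 1209600] e 0 4 = 1 := by
  have c1 : e < 604800 := by omega
  have c2 : ¬ e < 172800 := by omega
  rw [pvBisect_eval]; norm_num [c1]
  rw [pvBisect_eval]; norm_num [h2]
  rw [pvBisect_eval]; norm_num [c2]
  rw [pvBisect_eval]; norm_num

lemma pvBis2 (e : Int) (h1 : 259200 ≤ e) (h2 : e < 604800) :
    pvBisect [172800, 259200, 604800, 1209600] e 0 4 = 2 := by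
  have c1 : ¬ e < 259200 := by omega
  rw [pvBisect_eval]; norm_num [h2]
  rw [pvBisect_eval]; norm_num [c1]
  rw [pvBisect_eval]; norm_num

lemma pvBis3 (e : Int) (h1 : 604800 ≤ e) (h2 : e < 1209600) :
    pvBisect [172800, 259200, 604800, 1209600] e 0 4 = 3 := by
  have c1 : ¬ e < 604800 := by omega
  rw [pvBisect_eval]; norm_num [c1]
  rw [pvBisect_eval]; norm_num [h2]
  rw [pvBisect_eval]; norm_num

lemma pvBis4 (e : Int) (h1 : 1209600 ≤ e) :
    pvBisect [172800, 259200, 604800, 1209600] e 0 4 = 4 := by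
  have c1 : ¬ e < 604800 := by omega
  have c2 : ¬ e < 1209600 := by omega
  rw [pvBisect_eval]; norm_num [c1]
  rw [pvBisect_eval]; norm_num [c2]
  rw [pvBisect_eval]; norm_num

-- ===== VERDICT (by name: the statement is the Claim_ definition above) =====
theorem research_depth_for_elapsed_py_spec : Claim_equal_research_depth_for_elapsed_py := by
  intro e _
  unfold Spec_research_depth_for_elapsed_py research_depth_for_elapsed_py research_depth_for_elapsed_py_alt
  simp only [pvLevels, PySem.List.enumerate, List.foldl, List.map, List.length]
  norm_num
  by_cases h1 : e < 172800
  · have f1 : ¬ (172800 : Int) ≤ e := by omega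
    have f2 : ¬ (259200 : Int) ≤ e := by omega
    have f3 : ¬ (604800 : Int) ≤ e := by omega
    have f4 : ¬ (1209600 : Int) ≤ e := by omega
    norm_num [pvBis0 e h1, f1, f2, f3, f4]
  by_cases h2 : e < 259200
  · have f2 : ¬ (259200 : Int) ≤ e := by omega
    have f3 : ¬ (604800 : Int) ≤ e := by omega
    have f4 : ¬ (1209600 : Int) ≤ e := by omega
    norm_num [pvBis1 e (by omega) h2, (by omega : (172800 : Int) ≤ e), f2, f3, f4]
  by_cases h3 : e < 604800
  · have f3 : ¬ (604800 : Int) ≤ e := by omega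
    have f4 : ¬ (1209600 : Int) ≤ e := by omega
    norm_num [pvBis2 e (by omega) h3, (by omega : (172800 : Int) ≤ e),
      (by omega : (259200 : Int) ≤ e), f3, f4]
  by_cases h4 : e < 1209600
  · have f4 : ¬ (1209600 : Int) ≤ e := by omega
    norm_num [pvBis3 e (by omega) h4, (by omega : (172800 : Int) ≤ e),
      (by omega : (259200 : Int) ≤ e), (by omega : (604800 : Int) ≤ e), f4]
  · norm_num [pvBis4 e (by omega), (by omega : (172800 : Int) ≤ e),
      (by omega : (259200 : Int) ≤ e), (by omega : (604800 : Int) ≤ e),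
      (by omega : (1209600 : Int) ≤ e)]
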